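-- pv_equiv track=rewrite | github.com/Jacksadventure/betaMax | match_partial.py | _partial_ipv6
-- ===== SOURCE A (Python) =====
-- def _partial_ipv6(text: str) -> bool:
--     allowed = "0123456789abcdefABCDEF:"
--     if any(ch not in allowed for ch in text):
--         return False
--     if text.count(":::") > 0:
--         return False
--     parts = text.split(":")
--     double_colon = "::" in text
--     for part in parts:
--         if part and len(part) > 4:
--             return False
--     non_empty = sum(1 for part in parts if part)
--     if double_colon:
--         return non_empty <= 8
--     return non_empty < 8 or text.endswith(":")
-- ===== SOURCE B (Python) =====
-- def _partial_ipv6(text: str) -> bool: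
--     hexdigits = "0123456789abcdefABCDEF"
--     glen = 0        # length of the current hex group
--     run = 0         # length of the current consecutive-colon run
--     non_empty = 0   # number of finished non-empty groups
--     double = False  # a "::" was seen
--     for ch in text:
--         if ch in hexdigits:
--             glen += 1
--             if glen > 4:
--                 return False
--             run = 0
--         elif ch == ':':
--             if glen > 0:
--                 non_empty += 1
--             glen = 0
--             run += 1
--             if run >= 3:
--                 return False
--             if run == 2:
--                 double = True
--         else:
--             return False
--     if glen > 0:
--         non_empty += 1
--     if double:
--         return non_empty <= 8
--     return non_empty < 8 or run > 0
-- ===== Notes on version B (the rewrite author's own statement) =====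
-- stated objective: faster
-- what changed: A scans the string several times (allowed-character scan, ':::' substring count, split on ':', '::' substring search, a per-part length loop, a non-empty count); B is a single left-to-right pass over the characters maintaining the current group length, the consecutive-colon run length, the non-empty-group count and a double-colon flag, then applies the same final decision.
import Mathlib
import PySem

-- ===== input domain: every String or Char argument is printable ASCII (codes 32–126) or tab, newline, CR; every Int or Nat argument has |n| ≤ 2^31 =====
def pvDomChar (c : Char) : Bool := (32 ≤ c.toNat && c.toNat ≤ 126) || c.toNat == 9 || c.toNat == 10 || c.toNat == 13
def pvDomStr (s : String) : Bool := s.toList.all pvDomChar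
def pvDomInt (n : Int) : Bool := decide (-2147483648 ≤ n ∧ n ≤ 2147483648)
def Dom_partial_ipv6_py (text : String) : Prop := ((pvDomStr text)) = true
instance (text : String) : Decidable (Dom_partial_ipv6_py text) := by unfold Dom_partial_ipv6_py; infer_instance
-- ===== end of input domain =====

-- B replaces A's multi-pass string scanning (membership scan, substring count, split, substring
-- search, per-part loop) by a single left-to-right pass maintaining group length, colon-run
-- length, non-empty-group count and a double-colon flag (one pass, no intermediate lists; the
-- timing run measured B faster by a constant factor).


-- ===== PORT A =====
-- allowed = "0123456789abcdefABCDEF:" written as its character list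
def pvAllowed : List Char :=
  ['0','1','2','3','4','5','6','7','8','9','a','b','c','d','e','f','A','B','C','D','E','F',':']

def partial_ipv6_py (text : String) : Bool :=
  let cs := text.toList
  -- if any(ch not in allowed for ch in text): return False
  if cs.any (fun ch => !(PySem.Chars.isIn [ch] pvAllowed)) then false
  -- if text.count(":::") > 0: return False
  else if 0 < PySem.Chars.count cs [':', ':', ':'] then false
  else
    -- parts = text.split(":")
    let parts := PySem.Chars.splitOn cs [':']
    -- double_colon = "::" in text
    let double_colon := PySem.Chars.isIn [':', ':'] cs
    -- for part in parts: if part and len(part) > 4: return False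
    if parts.any (fun part => !part.isEmpty && decide (4 < part.length)) then false
    else
      -- non_empty = sum(1 for part in parts if part)
      let non_empty : Nat := parts.countP (fun part => !part.isEmpty)
      if double_colon then decide (non_empty ≤ 8)
      else decide (non_empty < 8) || PySem.Chars.endswith cs [':']

-- ===== PORT B =====
-- hexdigits = "0123456789abcdefABCDEF" written as its character list
def pvHexDigits : List Char :=
  ['0','1','2','3','4','5','6','7','8','9','a','b','c','d','e','f','A','B','C','D','E','F']

-- the single pass of Source B: state = (group length, colon-run length, non-empty count,
-- double-colon flag); none = an early `return False`
def pvAltGo : List Char → Nat → Nat → Nat → Bool → Option (Nat × Nat × Nat × Bool)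
  | [], glen, run, ne, dc => some (glen, run, ne, dc)
  | ch :: t, glen, run, ne, dc =>
    if pvHexDigits.contains ch then
      if 4 < glen + 1 then none else pvAltGo t (glen + 1) 0 ne dc
    else if ch == ':' then
      let ne' := if 0 < glen then ne + 1 else ne
      if 3 ≤ run + 1 then none
      else pvAltGo t 0 (run + 1) ne' (dc || run + 1 == 2)
    else none

def partial_ipv6_py_alt (text : String) : Bool :=
  match pvAltGo text.toList 0 0 0 false with
  | none => false
  | some (glen, run, ne, dc) =>
    let ne' := if 0 < glen then ne + 1 else ne
    if dc then decide (ne' ≤ 8) else decide (ne' < 8) || decide (0 < run)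

-- ===== PRECONDITION & SPEC =====
def Spec_partial_ipv6_py (text : String) (out : Bool) : Prop := out = partial_ipv6_py_alt text
instance (text : String) (out : Bool) : Decidable (Spec_partial_ipv6_py text out) := by unfold Spec_partial_ipv6_py; infer_instance

-- ===== CLAIM (what is proved, stated in full; the proofs are below) =====
def Claim_equal_partial_ipv6_py : Prop := ∀ (text : String), Dom_partial_ipv6_py text → Spec_partial_ipv6_py text (partial_ipv6_py text)

-- ===== LEMMAS AND PROOFS =====

-- structural version of text.split(":"): (first group, later groups)
def pvSplitR : List Char → List Char × List (List Char)
  | [] => ([], [])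
  | c :: t =>
    let p := pvSplitR t
    if c == ':' then ([], p.1 :: p.2) else (c :: p.1, p.2)

-- closed form of what the single pass computes from state (glen, run, ne, dc) on the rest cs
def pvRef (cs : List Char) (glen run ne : Nat) (dc : Bool) : Bool :=
  if cs.all (fun c => pvHexDigits.contains c || c == ':') then
    if List.replicate (3 - run) ':' <+: cs ∨ [':', ':', ':'] <:+: cs then false
    else if 4 < glen + (pvSplitR cs).1.length ∨ ∃ G ∈ (pvSplitR cs).2, 4 < G.length then false
    else
      let neAll := ne + ((if 0 < glen + (pvSplitR cs).1.length then 1 else 0)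
                          + (pvSplitR cs).2.countP (fun G => !G.isEmpty))
      let dcAll := dc || decide (List.replicate (2 - run) ':' <+: cs ∨ [':', ':'] <:+: cs)
      let ends : Bool := if cs.isEmpty then decide (0 < run) else decide ([':'] <:+ cs)
      if dcAll then decide (neAll ≤ 8) else decide (neAll < 8) || ends
  else false

def pvFinal (o : Option (Nat × Nat × Nat × Bool)) : Bool :=
  match o with
  | none => false
  | some (glen, run, ne, dc) =>
    let ne' := if 0 < glen then ne + 1 else ne
    if dc then decide (ne' ≤ 8) else decide (ne' < 8) || decide (0 < run)

theorem goLe (sub : List Char) (fuel : Nat) : ∀ (l : List Char) (acc : Nat),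
    acc ≤ PySem.Chars.count.go sub fuel l acc := by
  induction fuel with
  | zero => intro l acc; simp [PySem.Chars.count.go]
  | succ n ih =>
    intro l acc
    cases l with
    | nil => simp [PySem.Chars.count.go]
    | cons c t =>
      simp only [PySem.Chars.count.go]
      split
      · exact le_trans (Nat.le_succ acc) (ih _ _)
      · exact ih _ _

theorem goPos (sub : List Char) (hs : sub ≠ []) (fuel : Nat) : ∀ (l : List Char) (acc : Nat),
    l.length ≤ fuel → (acc < PySem.Chars.count.go sub fuel l acc ↔ ∃ j, sub <+: l.drop j) := by
  induction fuel with
  | zero =>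
    intro l acc h
    have : l = [] := by cases l <;> simp_all
    subst this
    simp [PySem.Chars.count.go, List.drop_nil]
    intro h'
    exact hs h'
  | succ n ih =>
    intro l acc h
    cases l with
    | nil =>
      simp [PySem.Chars.count.go]
      intro h'
      exact hs h'
    | cons c t =>
      simp only [PySem.Chars.count.go]
      split
      · rename_i hp
        constructor
        · intro _; exact ⟨0, by simpa using List.isPrefixOf_iff_prefix.mp hp⟩
        · intro _
          calc acc < acc + 1 := Nat.lt_succ_self acc
            _ ≤ _ := goLe sub n _ _
      · rename_i hp
        rw [ih t acc (by simpa using Nat.le_of_succ_le_succ h)]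
        constructor
        · rintro ⟨j, hj⟩; exact ⟨j + 1, by simpa using hj⟩
        · rintro ⟨j, hj⟩
          cases j with
          | zero =>
            simp at hj
            exact absurd (List.isPrefixOf_iff_prefix.mpr hj) hp
          | succ k => exact ⟨k, by simpa using hj⟩

theorem pvCountPos (cs sub : List Char) (h : sub ≠ []) :
    0 < PySem.Chars.count cs sub ↔ PySem.Chars.isIn sub cs = true := by
  rw [← PySem.Chars.exists_prefix_drop_iff_isIn]
  unfold PySem.Chars.count
  rw [if_neg (by simpa using h)]
  exact goPos sub h cs.length cs 0 le_rfl

theorem goEq (fuel : Nat) : ∀ (l cur : List Char) (acc : List (List Char)), l.length ≤ fuel →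
    PySem.Chars.splitOn.go [':'] fuel l cur acc
      = acc.reverse ++ (cur.reverse ++ (pvSplitR l).1) :: (pvSplitR l).2 := by
  induction fuel with
  | zero =>
    intro l cur acc h
    have : l = [] := by cases l <;> simp_all
    subst this
    simp [PySem.Chars.splitOn.go, pvSplitR]
  | succ n ih =>
    intro l cur acc h
    cases l with
    | nil => simp [PySem.Chars.splitOn.go, pvSplitR]
    | cons c t =>
      by_cases hc : c = ':'
      · subst hc
        simp only [PySem.Chars.splitOn.go, List.isPrefixOf, beq_self_eq_true, Bool.true_and,
          List.isPrefixOf_nil_left, if_pos]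
        simp only [List.length_cons, List.length_nil, List.drop_succ_cons, List.drop_zero, List.drop]
        rw [ih t [] (cur.reverse :: acc) (by simpa using Nat.le_of_succ_le_succ h)]
        simp [pvSplitR]
      · simp only [PySem.Chars.splitOn.go]
        rw [if_neg (by simp [List.isPrefixOf]; exact fun he => absurd he.symm hc)]
        rw [ih t (c :: cur) acc (by simpa using Nat.le_of_succ_le_succ h)]
        simp [pvSplitR, hc]
theorem pvSplitOnEq (cs : List Char) :
    PySem.Chars.splitOn cs [':'] = (pvSplitR cs).1 :: (pvSplitR cs).2 := by
  unfold PySem.Chars.splitOn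
  rw [goEq (cs.length+1) cs [] [] (by omega)]
  simp

theorem pvMaster (cs : List Char) : ∀ glen run ne dc, glen ≤ 4 → run ≤ 2 →
    (run = 2 → dc = true) → pvFinal (pvAltGo cs glen run ne dc) = pvRef cs glen run ne dc := by
  induction cs with
  | nil =>
    intro glen run ne dc hg hr hrd
    have h3 : ¬ (List.replicate (3 - run) ':' <+: ([] : List Char) ∨
        [':', ':', ':'] <:+: ([] : List Char)) := by
      rintro (h | h)
      · have := List.prefix_nil.mp h
        have : 3 - run = 0 := by
          by_contra hne
          rw [List.replicate_eq_nil_iff] at this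
          omega
        omega
      · have := List.infix_nil.mp h
        simp at this
    simp only [pvAltGo, pvFinal, pvRef, pvSplitR, List.all_nil, if_true, if_neg h3,
      List.isEmpty_nil, List.length_nil, List.countP_nil]
    have h4 : ¬ (4 < glen + 0 ∨ ∃ G ∈ ([] : List (List Char)), 4 < G.length) := by
      simp; omega
    rw [if_neg h4]
    have h5 : (List.replicate (2 - run) ':' <+: ([] : List Char) ∨
        [':', ':'] <:+: ([] : List Char)) ↔ run = 2 := by
      constructor
      · rintro (h | h)
        · have := List.prefix_nil.mp h
          rw [List.replicate_eq_nil_iff] at this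
          omega
        · have := List.infix_nil.mp h
          simp at this
      · intro h
        left
        rw [h]
        simp
    simp only [h5]
    have hne : (if 0 < glen then ne + 1 else ne) = ne + (if 0 < glen then 1 else 0) := by
      split_ifs <;> omega
    by_cases hr2 : run = 2
    · simp [hr2, hrd hr2, hne]
    · simp [hr2]
      cases dc <;> simp [hne]
  | cons c t ih =>
    intro glen run ne dc hg hr hrd
    by_cases hc : c = ':'
    · subst hc
      have hcontains : pvHexDigits.contains ':' = false := by decide
      by_cases hall : t.all (fun c => pvHexDigits.contains c || c == ':')
      · -- all chars allowed
        interval_cases run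
        · -- run = 0
          simp only [pvAltGo, hcontains, Bool.false_eq_true, if_false, beq_self_eq_true, if_true]
          rw [if_neg (by omega)]
          rw [ih _ _ _ _ (by omega) (by omega) (by intro h; omega)]
          have h1 : [':', ':', ':'] <+: ':' :: t ↔ [':', ':'] <+: t := by
            simp [List.cons_prefix_cons]
          have h2 : [':', ':'] <+: ':' :: t ↔ [':'] <+: t := by
            simp [List.cons_prefix_cons]
          simp [pvRef, pvSplitR, List.infix_cons_iff, List.suffix_cons_iff, h1, h2,
            List.countP_cons, hall, hcontains]
          have h4g : ¬ (4 < glen) := by omega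
          have hsum : (if 0 < glen then ne + 1 else ne) +
              ((if 0 < (pvSplitR t).1.length then 1 else 0)
                + List.countP (fun G => !G.isEmpty) (pvSplitR t).2)
              = ne + ((if 0 < glen then 1 else 0) +
                (List.countP (fun G => !G.isEmpty) (pvSplitR t).2
                  + if (pvSplitR t).1 = [] then 0 else 1)) := by
            by_cases hfe : (pvSplitR t).1 = [] <;> split_ifs <;> simp_all <;> omega
          simp [h4g, hsum]
        · -- run = 1
          simp only [pvAltGo, hcontains, Bool.false_eq_true, if_false, beq_self_eq_true, if_true]
          rw [if_neg (by omega)]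
          rw [ih _ _ _ _ (by omega) (by omega) (by intro h; simp)]
          have h1 : [':', ':', ':'] <+: ':' :: t ↔ [':', ':'] <+: t := by
            simp [List.cons_prefix_cons]
          have h2 : [':', ':'] <+: ':' :: t ↔ [':'] <+: t := by
            simp [List.cons_prefix_cons]
          have h3 : [':'] <+: ':' :: t := ⟨t, rfl⟩
          have hstep : [':', ':'] <+: t → [':'] <+: t := fun h =>
            List.IsPrefix.trans (⟨[':'], rfl⟩ : [':'] <+: [':', ':']) h
          have h4g : ¬ (4 < glen) := by omega
          have hsum : (if 0 < glen then ne + 1 else ne) +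
              ((if 0 < (pvSplitR t).1.length then 1 else 0)
                + List.countP (fun G => !G.isEmpty) (pvSplitR t).2)
              = ne + ((if 0 < glen then 1 else 0) +
                (List.countP (fun G => !G.isEmpty) (pvSplitR t).2
                  + if (pvSplitR t).1 = [] then 0 else 1)) := by
            by_cases hfe : (pvSplitR t).1 = [] <;> split_ifs <;> simp_all <;> omega
          simp [pvRef, pvSplitR, List.infix_cons_iff, List.suffix_cons_iff, h1, h2, h3,
            List.countP_cons, hall, hcontains, h4g, hsum]
          by_cases p1 : [':'] <+: t
          · simp [p1]
          · have p2 : ¬ [':', ':'] <+: t := fun h => p1 (hstep h)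
            simp [p1, p2]
        · -- run = 2: triple colon, both sides False
          simp only [pvAltGo, hcontains, Bool.false_eq_true, if_false, beq_self_eq_true, if_true]
          rw [if_pos (by omega)]
          have hpre : List.replicate (3 - 2) ':' <+: ':' :: t := by
            simp [List.replicate]
          simp [pvFinal, pvRef, hall, hpre]
      · -- not all allowed: both sides false
        simp only [pvAltGo, hcontains, Bool.false_eq_true, if_false, beq_self_eq_true, if_true]
        by_cases h3 : 3 ≤ run + 1
        · rw [if_pos h3]
          have hallc : ((':' :: t).all (fun c => pvHexDigits.contains c || c == ':')) = false := by
            simp only [List.all_cons, hcontains, beq_self_eq_true, Bool.false_or, Bool.true_and]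
            simpa using hall
          unfold pvRef
          rw [if_neg (by rw [hallc]; exact Bool.false_ne_true)]
          rfl
        · rw [if_neg h3]
          rw [ih _ _ _ _ (by omega) (by omega) (by intro h; simp [show run + 1 = 2 from h])]
          have hallc : ((':' :: t).all (fun c => pvHexDigits.contains c || c == ':')) = false := by
            simp only [List.all_cons, hcontains, beq_self_eq_true, Bool.false_or, Bool.true_and]
            simpa using hall
          unfold pvRef
          rw [if_neg hall, if_neg (by rw [hallc]; exact Bool.false_ne_true)]
    · -- c is not ':'
      by_cases hhex : pvHexDigits.contains c = true
      · -- hex digit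
        by_cases hall : (t.all fun c => pvHexDigits.contains c || c == ':') = true
        · by_cases hover : 4 < glen + 1
          · -- fifth hex digit in a group: both sides False
            simp only [pvAltGo, hhex, if_true, if_pos hover]
            have hlen : 4 < glen + ((pvSplitR t).1.length + 1) := by omega
            simp [pvFinal, pvRef, pvSplitR, hc, hall, hhex, hlen]
          · simp only [pvAltGo, hhex, if_true, if_neg hover]
            rw [ih _ _ _ _ (by omega) (by omega) (by omega)]
            have hne : (':' : Char) ≠ c := fun h => hc h.symm
            have harr : glen + ((pvSplitR t).1.length + 1)
                = glen + 1 + (pvSplitR t).1.length := by omega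
            interval_cases run
            · simp [pvRef, pvSplitR, List.infix_cons_iff, List.suffix_cons_iff,
                List.cons_prefix_cons, hc, hne, hall, hhex, harr]
              have hmem : c ∈ pvHexDigits := by simpa using hhex
              have hends : (!decide (t = []) && decide ([':'] <:+ t)) = decide ([':'] <:+ t) := by
                by_cases ht : t = [] <;> simp [ht]
              have q3p : ¬ [':', ':', ':'] <:+: t → ¬ [':', ':', ':'] <+: t :=
                fun hq h => hq h.isInfix
              have q2p : ¬ [':', ':'] <:+: t → ¬ [':', ':'] <+: t :=
                fun hq h => hq h.isInfix
              by_cases q3 : [':', ':', ':'] <:+: t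
              · simp [hmem, hends, q3]
              · by_cases q2 : [':', ':'] <:+: t
                · simp [hmem, hends, q3, q3p q3, q2]
                · simp [hmem, hends, q3, q3p q3, q2, q2p q2]
            · simp [pvRef, pvSplitR, List.infix_cons_iff, List.suffix_cons_iff,
                List.cons_prefix_cons, hc, hne, hall, hhex, harr]
              have hmem : c ∈ pvHexDigits := by simpa using hhex
              have hends : (!decide (t = []) && decide ([':'] <:+ t)) = decide ([':'] <:+ t) := by
                by_cases ht : t = [] <;> simp [ht]
              have q3p : ¬ [':', ':', ':'] <:+: t → ¬ [':', ':', ':'] <+: t :=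
                fun hq h => hq h.isInfix
              have q2p : ¬ [':', ':'] <:+: t → ¬ [':', ':'] <+: t :=
                fun hq h => hq h.isInfix
              by_cases q3 : [':', ':', ':'] <:+: t
              · simp [hmem, hends, q3]
              · by_cases q2 : [':', ':'] <:+: t
                · simp [hmem, hends, q3, q3p q3, q2]
                · simp [hmem, hends, q3, q3p q3, q2, q2p q2]
            · simp [pvRef, pvSplitR, List.infix_cons_iff, List.suffix_cons_iff,
                List.cons_prefix_cons, hc, hne, hall, hhex, harr, hrd rfl]
              have hmem : c ∈ pvHexDigits := by simpa using hhex
              have hends : (!decide (t = []) && decide ([':'] <:+ t)) = decide ([':'] <:+ t) := by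
                by_cases ht : t = [] <;> simp [ht]
              have q3p : ¬ [':', ':', ':'] <:+: t → ¬ [':', ':', ':'] <+: t :=
                fun hq h => hq h.isInfix
              have q2p : ¬ [':', ':'] <:+: t → ¬ [':', ':'] <+: t :=
                fun hq h => hq h.isInfix
              by_cases q3 : [':', ':', ':'] <:+: t
              · simp [hmem, hends, q3]
              · by_cases q2 : [':', ':'] <:+: t
                · simp [hmem, hends, q3, q3p q3, q2]
                · simp [hmem, hends, q3, q3p q3, q2, q2p q2]
        · -- some char of t not allowed: both sides false
          simp only [pvAltGo, hhex, if_true]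
          by_cases hover : 4 < glen + 1
          · rw [if_pos hover]
            have hallc : ((c :: t).all fun c => pvHexDigits.contains c || c == ':') = false := by
              simp only [List.all_cons, hhex, Bool.true_or, Bool.true_and]
              simpa using hall
            unfold pvRef
            rw [if_neg (by rw [hallc]; exact Bool.false_ne_true)]
            rfl
          · rw [if_neg hover]
            rw [ih _ _ _ _ (by omega) (by omega) (by omega)]
            have hallc : ((c :: t).all fun c => pvHexDigits.contains c || c == ':') = false := by
              simp only [List.all_cons, hhex, Bool.true_or, Bool.true_and]
              simpa using hall
            unfold pvRef
            rw [if_neg hall, if_neg (by rw [hallc]; exact Bool.false_ne_true)]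
      · -- disallowed character: both sides False
        have hcb : (c == ':') = false := by simp [hc]
        simp only [pvAltGo, hhex, Bool.false_eq_true, if_false, hcb]
        have hhex' : pvHexDigits.contains c = false := by simpa using hhex
        have hallc : ((c :: t).all fun c => pvHexDigits.contains c || c == ':') = false := by
          simp only [List.all_cons, hhex', hcb, Bool.or_self, Bool.false_and]
        unfold pvRef
        rw [if_neg (by rw [hallc]; exact Bool.false_ne_true)]
        rfl

theorem pvAeqRef (text : String) : partial_ipv6_py text = pvRef text.toList 0 0 0 false := by
  unfold partial_ipv6_py pvRef
  generalize text.toList = cs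
  have hch : ∀ ch : Char, PySem.Chars.isIn [ch] pvAllowed
      = (pvHexDigits.contains ch || ch == ':') := by
    intro ch
    rw [Bool.eq_iff_iff, PySem.Chars.isIn_iff_infix, List.singleton_infix_iff,
      show pvAllowed = pvHexDigits ++ [':'] from rfl, List.mem_append]
    simp [List.contains_iff_mem]
  have hany : (cs.any fun ch => !(PySem.Chars.isIn [ch] pvAllowed))
      = !(cs.all fun c => pvHexDigits.contains c || c == ':') := by
    simp only [hch, List.any_eq_not_all_not, Bool.not_not]
  have hiin3 : (0 < PySem.Chars.count cs [':', ':', ':']) ↔ [':', ':', ':'] <:+: cs :=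
    (pvCountPos cs [':', ':', ':'] (by simp)).trans (PySem.Chars.isIn_iff_infix _ _)
  have hdbl : PySem.Chars.isIn [':', ':'] cs = decide ([':', ':'] <:+: cs) := by
    rw [Bool.eq_iff_iff, PySem.Chars.isIn_iff_infix]; simp
  have hends : PySem.Chars.endswith cs [':'] = decide ([':'] <:+ cs) := by
    rw [Bool.eq_iff_iff, PySem.Chars.endswith_iff]; simp
  have habs2 : (List.replicate (3 - 0) ':' <+: cs ∨ [':', ':', ':'] <:+: cs)
      ↔ [':', ':', ':'] <:+: cs := by
    rw [show List.replicate (3 - 0) ':' = [':', ':', ':'] from rfl]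
    exact ⟨fun h => h.elim (fun h => h.isInfix) id, Or.inr⟩
  have habsd : (List.replicate (2 - 0) ':' <+: cs ∨ [':', ':'] <:+: cs)
      ↔ [':', ':'] <:+: cs := by
    rw [show List.replicate (2 - 0) ':' = [':', ':'] from rfl]
    exact ⟨fun h => h.elim (fun h => h.isInfix) id, Or.inr⟩
  have hgt : ∀ p : List Char, (!p.isEmpty && decide (4 < p.length)) = decide (4 < p.length) := by
    intro p; cases p <;> simp
  have hendsIf : (if cs.isEmpty then decide ((0 : Nat) < 0) else decide ([':'] <:+ cs))
      = decide ([':'] <:+ cs) := by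
    cases cs <;> simp
  simp only [hany, pvSplitOnEq cs]
  by_cases hall : (cs.all fun c => pvHexDigits.contains c || c == ':') = true
  · simp only [hall, Bool.not_true, Bool.false_eq_true, if_false, if_true]
    by_cases ht : [':', ':', ':'] <:+: cs
    · simp [hiin3, habs2, ht]
    · rw [if_neg (show ¬ (0 < PySem.Chars.count cs [':', ':', ':']) from fun h => ht (hiin3.mp h)),
        if_neg (show ¬ (List.replicate (3 - 0) ':' <+: cs ∨ [':', ':', ':'] <:+: cs) from
          fun h => ht (habs2.mp h))]
      have h3 : ((pvSplitR cs).1 :: (pvSplitR cs).2).any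
            (fun part => !part.isEmpty && decide (4 < part.length))
          = decide (4 < 0 + (pvSplitR cs).1.length ∨ ∃ G ∈ (pvSplitR cs).2, 4 < G.length) := by
        rw [Bool.eq_iff_iff]
        simp only [hgt, List.any_cons, List.any_eq_true, Bool.or_eq_true, decide_eq_true_eq]
        simp
      rw [h3]
      by_cases h4 : (4 < 0 + (pvSplitR cs).1.length ∨ ∃ G ∈ (pvSplitR cs).2, 4 < G.length)
      · rw [if_pos (show (decide (4 < 0 + (pvSplitR cs).1.length ∨
            ∃ G ∈ (pvSplitR cs).2, 4 < G.length)) = true from by simpa using h4), if_pos h4]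
      · rw [if_neg (show ¬ ((decide (4 < 0 + (pvSplitR cs).1.length ∨
            ∃ G ∈ (pvSplitR cs).2, 4 < G.length)) = true) from by simpa using h4), if_neg h4]
        have hnesum : ((pvSplitR cs).1 :: (pvSplitR cs).2).countP (fun part => !part.isEmpty)
            = 0 + ((if 0 < 0 + (pvSplitR cs).1.length then 1 else 0)
              + (pvSplitR cs).2.countP fun G => !G.isEmpty) := by
          rw [List.countP_cons]
          have hfg01 : (if !(pvSplitR cs).1.isEmpty then 1 else 0)
              = (if 0 < 0 + (pvSplitR cs).1.length then 1 else 0) := by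
            cases (pvSplitR cs).1 <;> simp
          rw [hfg01]
          omega
        rw [hdbl, hends, hnesum]
        simp only [habsd, hendsIf, Bool.false_or]
  · rw [if_pos (show (!(cs.all fun c => pvHexDigits.contains c || c == ':')) = true by
        cases h : (cs.all fun c => pvHexDigits.contains c || c == ':') with
        | false => rfl
        | true => exact absurd h hall), if_neg hall]

-- ===== VERDICT (by name: the statement is the Claim_ definition above) =====
theorem partial_ipv6_py_spec : Claim_equal_partial_ipv6_py := by
  intro text _
  unfold Spec_partial_ipv6_py
  have h := pvMaster text.toList 0 0 0 false (by omega) (by omega) (by intro h; omega)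
  rw [pvAeqRef text, ← h]
  rfl
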